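-- pv_equiv track=rewrite | github.com/wcaarls/grl | bin/grllib.py | findparams
-- ===== SOURCE A (Python) =====
-- import itertools
--
-- def splittype(type):
--   """Splits type into base and role."""
--   temp = type.split('.')
--   if len(temp) == 1:
--     return temp[0], ''
--   else:
--     return temp[0], temp[1]
--
-- def isnumber(type):
--   try:
--     float(type)
--     return True
--   except ValueError:
--     return False
--
-- def findparams(params, type):
--   """Find registered parameters that match a certain type."""
--   components = type.split('+')
--
--   pmatches = list()
--
--   for c in components:
--     cmatches = list()
--     if c == '':
--       cmatches.append('')
--     elif isnumber(c):
--       cmatches.append(c)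
--     else:
--       base, role = splittype(c)
--
--       for key in params:
--         if params[key][0:len(base)] == base and (role == "" or params[key][-len(role):] == role):
--           keybase, keyrole = splittype(key)
--           cmatches.append(keybase)
--
--     pmatches.append(cmatches)
--
--   # Cartesian product
--   matches = list()
--   for element in itertools.product(*pmatches):
--     matches.append('+'.join(element))
--
--   return sorted(list(set(matches)))
-- ===== SOURCE B (Python) =====
-- def findparams(params, type):
--   """Find registered parameters that match a certain type."""
--   def isnum(c):
--     try:
--       float(c)
--       return True
--     except ValueError:
--       return False
--
--   def matchset(c):
--     """Set of matches for one component."""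
--     if c == '':
--       return {''}
--     if isnum(c):
--       return {c}
--     base, role = (c.split('.') + [''])[:2]
--     out = set()
--     for key, val in params.items():
--       if val.startswith(base) and (role == '' or val.endswith(role)):
--         out.add(key.split('.')[0])
--     return out
--
--   def combos(comps):
--     """Set of joined combinations, built right-to-left with dedup at every level."""
--     if len(comps) == 1:
--       return matchset(comps[0])
--     rest = combos(comps[1:])
--     return {m + '+' + s for m in matchset(comps[0]) for s in rest}
--
--   return sorted(combos(type.split('+')))
-- ===== Notes on version B (the rewrite author's own statement) =====
-- stated objective: alternative
-- what changed: B never materialises A's list-of-match-lists or the full itertools.product list: it recurses right-to-left over the components, keeping a deduplicated SET of joined suffix combinations at every level (so duplicate matches are collapsed before they multiply), and matches one component by a single pass over params.items() with startswith/endswith; the final sorted runs on an already-deduplicated set.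
import Mathlib
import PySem

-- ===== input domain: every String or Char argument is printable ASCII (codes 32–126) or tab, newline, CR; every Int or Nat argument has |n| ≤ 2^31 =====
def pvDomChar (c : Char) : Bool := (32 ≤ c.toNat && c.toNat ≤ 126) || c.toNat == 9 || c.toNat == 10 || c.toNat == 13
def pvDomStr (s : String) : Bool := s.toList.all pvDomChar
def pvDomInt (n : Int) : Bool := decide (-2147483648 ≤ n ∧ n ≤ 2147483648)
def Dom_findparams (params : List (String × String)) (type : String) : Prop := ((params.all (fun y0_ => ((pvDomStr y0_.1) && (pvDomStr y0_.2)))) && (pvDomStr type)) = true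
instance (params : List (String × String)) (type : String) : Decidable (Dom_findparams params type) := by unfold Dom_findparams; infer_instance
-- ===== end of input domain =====

-- B drops A's list-of-match-lists and itertools.product: it recurses right-to-left over the
-- components keeping a deduplicated SET of joined suffix combinations at every level (duplicates
-- are collapsed before they multiply), so the final sorted runs on an already-deduplicated set
-- (objective: alternative algorithm, same result).

-- ===== PORT A =====
-- shared helper: 'float(c) succeeds' (isnumber's try/except float(c)); exact on the
-- printable-ASCII + tab/newline/CR domain (no unicode digits/whitespace there).
-- pyDigTail consumes (digit | '_' digit)* — Python's underscore-between-digits rule.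
def pyDigTail : List Char → List Char
  | [] => []
  | c :: r =>
    if PySem.Chars.isdigit c then pyDigTail r
    else if c = '_' then
      match r with
      | d :: r' => if PySem.Chars.isdigit d then pyDigTail r' else c :: d :: r'
      | [] => [c]
    else c :: r

-- a nonempty digit run (with underscores); returns the remainder, none if no leading digit
def pyParseD? : List Char → Option (List Char)
  | [] => none
  | c :: r => if PySem.Chars.isdigit c then some (pyDigTail r) else none

-- mantissa: D [. [D]] | . D
def pyMant? (s : List Char) : Option (List Char) :=
  match pyParseD? s with
  | some r =>
    match r with
    | '.' :: r2 => some ((pyParseD? r2).getD r2)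
    | _ => some r
  | none =>
    match s with
    | '.' :: r => pyParseD? r
    | _ => none

def pyEatSign : List Char → List Char
  | [] => []
  | c :: r => if c = '+' ∨ c = '-' then r else c :: r

def pyWsOnly (s : List Char) : Bool := s.all PySem.Chars.isspace

def pyFloatOk (s : String) : Bool :=
  let s1 := s.toList.dropWhile PySem.Chars.isspace
  let s2 := pyEatSign s1
  let low := PySem.Chars.lower s2
  if ("infinity".toList).isPrefixOf low then pyWsOnly (s2.drop 8)
  else if ("inf".toList).isPrefixOf low then pyWsOnly (s2.drop 3)
  else if ("nan".toList).isPrefixOf low then pyWsOnly (s2.drop 3)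
  else
    match pyMant? s2 with
    | none => false
    | some r =>
      match r with
      | c :: rr =>
        if c = 'e' ∨ c = 'E' then
          match pyParseD? (pyEatSign rr) with
          | some r2 => pyWsOnly r2
          | none => false
        else pyWsOnly (c :: rr)
      | [] => true

-- s.split('.') / s.split('+'): sep is a nonempty literal, so split? is always `some`
def pySplitDot (s : String) : List String := (PySem.Str.split? s ".").getD []

-- splittype from the module
def pySplittype (t : String) : String × String :=
  let temp := pySplitDot t
  if temp.length = 1 then (PySem.List.pyGetD temp 0 "", "")
  else (PySem.List.pyGetD temp 0 "", PySem.List.pyGetD temp 1 "")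

-- the inner 'for key in params' loop building cmatches for one component c
def findparamsCm (d : PySem.Dict String String) (c : String) : List String :=
  if c = "" then [""]
  else if pyFloatOk c then [c]
  else
    let br := pySplittype c
    d.keys.foldl (fun cm key =>
      if PySem.Str.slice (d.getD key "") (some 0) (some (PySem.Str.len br.1)) = br.1
          ∧ (br.2 = "" ∨ PySem.Str.slice (d.getD key "") (some (-(PySem.Str.len br.2))) none = br.2)
      then cm ++ [(pySplittype key).1] else cm) []

-- itertools.product(*pmatches) (leftmost component varies slowest)
def pyProduct : List (List String) → List (List String)
  | [] => [[]]
  | l :: ls => l.flatMap (fun x => (pyProduct ls).map (x :: ·))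

def findparams (params : List (String × String)) (type : String) : List String :=
  let d : PySem.Dict String String := PySem.Dict.ofList params
  let components := (PySem.Str.split? type "+").getD []
  let pmatches := components.foldl (fun pm c => pm ++ [findparamsCm d c]) []
  let matchesL := (pyProduct pmatches).map (fun el => PySem.Str.join "+" el)
  PySem.List.sorted (PySem.Set.ofList matchesL) (fun x => x) false

-- ===== PORT B =====
-- m + '+' + s on the code-point lists (Python str concatenation)
def catPlus (a m : String) : String := String.ofList (a.toList ++ '+' :: m.toList)

-- matchset(c): the SET of matches for one component (built by out.add over params.items())
def altMatchset (params : List (String × String)) (c : String) : PySem.Set String :=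
  if c = "" then PySem.Set.ofList [""]
  else if pyFloatOk c then PySem.Set.ofList [c]
  else
    let br := PySem.List.slice (pySplitDot c ++ [""]) none (some 2)
    let base := PySem.List.pyGetD br 0 ""
    let role := PySem.List.pyGetD br 1 ""
    (PySem.Dict.ofList params).items.foldl
      (fun out kv =>
        if PySem.Str.startswith kv.2 base && (decide (role = "") || PySem.Str.endswith kv.2 role)
        then PySem.Set.add out (PySem.List.pyGetD (pySplitDot kv.1) 0 "") else out)
      PySem.Set.empty

-- combos(comps): right-to-left recursion, a set comprehension at each level
-- (the [] case is unreachable: str.split always yields at least one component)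
def altCombos (params : List (String × String)) : List String → PySem.Set String
  | [] => PySem.Set.empty
  | [c] => altMatchset params c
  | c :: c2 :: rest =>
      PySem.Set.ofList ((altMatchset params c).flatMap
        (fun m => (altCombos params (c2 :: rest)).map (fun s => catPlus m s)))

def findparams_alt (params : List (String × String)) (type : String) : List String :=
  PySem.List.sorted (altCombos params ((PySem.Str.split? type "+").getD [])) (fun x => x) false

-- ===== PRECONDITION & SPEC =====
def Spec_findparams (params : List (String × String)) (type : String) (out : List String) : Prop := out = findparams_alt params type
instance (params : List (String × String)) (type : String) (out : List String) : Decidable (Spec_findparams params type out) := by unfold Spec_findparams; infer_instance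

-- ===== CLAIM (what is proved, stated in full; the proofs are below) =====
def Claim_equal_findparams : Prop := ∀ (params : List (String × String)) (type : String), Dom_findparams params type → Spec_findparams params type (findparams params type)

-- ===== LEMMAS AND PROOFS =====

-- str.split(sep) with sep ≠ '' never returns an empty list
theorem splitOn_go_ne_nil (sep : List Char) : ∀ (fuel : Nat) (l cur : List Char) (acc : List (List Char)),
    PySem.Chars.splitOn.go sep fuel l cur acc ≠ [] := by
  intro fuel
  induction fuel with
  | zero => intro l cur acc; simp [PySem.Chars.splitOn.go]
  | succ n ih =>
    intro l cur acc
    cases l with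
    | nil => simp [PySem.Chars.splitOn.go]
    | cons c rest =>
      rw [PySem.Chars.splitOn.go]
      split
      · exact ih _ _ _
      · exact ih _ _ _

theorem split_ne_nil (s sep : String) (hs : sep.toList ≠ []) : (PySem.Str.split? s sep).getD [] ≠ [] := by
  unfold PySem.Str.split? PySem.Chars.split? PySem.Chars.splitOn
  simp [List.isEmpty_iff, hs]
  exact splitOn_go_ne_nil _ _ _ _ _

theorem prefix_cond (v base : String) :
    (PySem.Str.slice v (some 0) (some (PySem.Str.len base)) = base) ↔ PySem.Str.startswith v base = true := by
  rw [String.ext_iff]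
  rw [PySem.Str.startswith_eq, PySem.Chars.startswith_iff, List.prefix_iff_eq_take]
  rw [PySem.Str.toList_slice, PySem.Chars.slice_eq_listSlice, PySem.Str.len_eq]
  rw [PySem.List.slice_zero_start, PySem.List.slice_to_natCast]
  exact eq_comm

theorem suffix_cond (v role : String) (hr : role ≠ "") :
    (PySem.Str.slice v (some (-(PySem.Str.len role))) none = role) ↔ PySem.Str.endswith v role = true := by
  rw [String.ext_iff]
  rw [PySem.Str.endswith_eq, PySem.Chars.endswith_iff, List.suffix_iff_eq_drop]
  rw [PySem.Str.toList_slice, PySem.Chars.slice_eq_listSlice, PySem.Str.len_eq]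
  rw [PySem.List.slice_from_neg_natCast _ _ (by have h0 : role.length ≠ 0 := fun h => hr (String.length_eq_zero_iff.mp h); simp; omega : 0 < role.toList.length)]
  exact eq_comm

theorem slice_cond_eq (v base role : String) :
    decide ((PySem.Str.slice v (some 0) (some (PySem.Str.len base)) = base)
      ∧ (role = "" ∨ PySem.Str.slice v (some (-(PySem.Str.len role))) none = role))
    = (PySem.Str.startswith v base && (decide (role = "") || PySem.Str.endswith v role)) := by
  rw [Bool.eq_iff_iff]
  simp only [decide_eq_true_eq, Bool.and_eq_true, Bool.or_eq_true]
  constructor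
  · rintro ⟨h1, h2⟩
    refine ⟨(prefix_cond v base).mp h1, ?_⟩
    rcases h2 with h | h
    · exact Or.inl (by simp [h])
    · by_cases hr : role = ""
      · exact Or.inl (by simp [hr])
      · exact Or.inr ((suffix_cond v role hr).mp h)
  · rintro ⟨h1, h2⟩
    refine ⟨(prefix_cond v base).mpr h1, ?_⟩
    rcases h2 with h | h
    · exact Or.inl (by simpa using h)
    · by_cases hr : role = ""
      · exact Or.inl hr
      · exact Or.inr ((suffix_cond v role hr).mpr h)

theorem splitfirst (k : String) : (pySplittype k).1 = PySem.List.pyGetD (pySplitDot k) 0 "" := by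
  unfold pySplittype; dsimp only; split <;> rfl

-- base/role as B computes them, from (c.split('.') + [''])[:2]
theorem altBase_eq (c : String) :
    PySem.List.pyGetD (PySem.List.slice (pySplitDot c ++ [""]) none (some 2)) 0 "" = (pySplittype c).1 := by
  rcases hl : pySplitDot c with _ | ⟨a, rest⟩
  · exact absurd hl (split_ne_nil c "." (by decide))
  · rw [splitfirst, hl, PySem.List.slice_to _ (by norm_num : (0:Int) ≤ 2),
      show Int.toNat 2 = 2 from rfl, List.cons_append, List.take_succ_cons,
      PySem.List.pyGetD_zero_cons, PySem.List.pyGetD_zero_cons]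

theorem altRole_eq (c : String) :
    PySem.List.pyGetD (PySem.List.slice (pySplitDot c ++ [""]) none (some 2)) 1 "" = (pySplittype c).2 := by
  rcases hl : pySplitDot c with _ | ⟨a, rest⟩
  · exact absurd hl (split_ne_nil c "." (by decide))
  · unfold pySplittype
    rw [hl, PySem.List.slice_to _ (by norm_num : (0:Int) ≤ 2),
      show Int.toNat 2 = 2 from rfl]
    cases rest with
    | nil => rfl
    | cons b r =>
      dsimp only
      rw [if_neg (by simp)]
      simp [PySem.List.pyGetD_ofNat']

-- the conditional-append key loop of A as filter+map over the dict items
theorem cm_eq (params : List (String × String)) (c : String) (h0 : ¬ c = "") (h1 : ¬ pyFloatOk c = true) :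
    findparamsCm (PySem.Dict.ofList params) c =
      (((PySem.Dict.ofList params).items.filter
          (fun kv => PySem.Str.startswith kv.2 (pySplittype c).1 &&
            (decide ((pySplittype c).2 = "") || PySem.Str.endswith kv.2 (pySplittype c).2))).map
        (fun kv => PySem.List.pyGetD (pySplitDot kv.1) 0 "")) := by
  unfold findparamsCm
  simp only [if_neg h0, if_neg h1]
  rw [show (fun (cm : List String) key =>
      if PySem.Str.slice ((PySem.Dict.ofList params).getD key "") (some 0) (some (PySem.Str.len (pySplittype c).1)) = (pySplittype c).1
          ∧ ((pySplittype c).2 = "" ∨ PySem.Str.slice ((PySem.Dict.ofList params).getD key "") (some (-(PySem.Str.len (pySplittype c).2))) none = (pySplittype c).2)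
      then cm ++ [(pySplittype key).1] else cm)
      = (fun (cm : List String) key =>
      if (fun k => decide (PySem.Str.slice ((PySem.Dict.ofList params).getD k "") (some 0) (some (PySem.Str.len (pySplittype c).1)) = (pySplittype c).1
          ∧ ((pySplittype c).2 = "" ∨ PySem.Str.slice ((PySem.Dict.ofList params).getD k "") (some (-(PySem.Str.len (pySplittype c).2))) none = (pySplittype c).2))) key = true
      then cm ++ [(pySplittype key).1] else cm) from by funext cm key; simp]
  rw [PySem.List.foldl_append_if]
  simp only [List.nil_append]
  rw [show (PySem.Dict.ofList params).keys = (PySem.Dict.ofList params).items.map Prod.fst from rfl]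
  rw [List.filter_map, List.map_map]
  rw [List.filter_congr (q := fun kv => PySem.Str.startswith kv.2 (pySplittype c).1 &&
      (decide ((pySplittype c).2 = "") || PySem.Str.endswith kv.2 (pySplittype c).2)) ?_]
  · congr 1
    funext kv
    simp [splitfirst]
  · rintro ⟨k, v⟩ hkv
    have hv : (PySem.Dict.ofList params).getD k "" = v :=
      PySem.Dict.getD_of_mem_items _ hkv (PySem.Dict.nodup_keys_ofList params) ""
    simp only [Function.comp_apply, hv]
    exact slice_cond_eq v (pySplittype c).1 (pySplittype c).2

-- a conditional-add loop from the empty set is set(filter+map)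
theorem foldl_add_if {α β : Type} [BEq β] (p : α → Bool) (f : α → β) :
    ∀ (l : List α) (s0 : PySem.Set β),
    l.foldl (fun s y => if p y then PySem.Set.add s (f y) else s) s0
      = ((l.filter p).map f).foldl PySem.Set.add s0 := by
  intro l
  induction l with
  | nil => intro s0; rfl
  | cons y l ih =>
    intro s0
    by_cases hp : p y = true
    · simp [hp, ih]
    · simp [hp, ih]

-- B's matchset is exactly set(A's cmatches)
theorem matchset_eq (params : List (String × String)) (c : String) :
    altMatchset params c = PySem.Set.ofList (findparamsCm (PySem.Dict.ofList params) c) := by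
  by_cases h0 : c = ""
  · simp [altMatchset, findparamsCm, h0]
  by_cases h1 : pyFloatOk c = true
  · simp [altMatchset, findparamsCm, h0, h1]
  rw [cm_eq params c h0 h1]
  simp only [altMatchset, if_neg h0, if_neg h1, altBase_eq, altRole_eq]
  rw [foldl_add_if]
  rw [PySem.Set.ofList_eq_foldl]
  rfl

theorem nodup_combos (params : List (String × String)) :
    ∀ comps, (altCombos params comps).Nodup := by
  intro comps
  match comps with
  | [] => exact List.nodup_nil
  | [c] =>
    rw [altCombos, matchset_eq]
    exact PySem.Set.nodup_ofList _
  | c :: c2 :: rest =>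
    rw [altCombos]
    exact PySem.Set.nodup_ofList _

theorem length_mem_pyProduct : ∀ (ls : List (List String)) (t : List String), t ∈ pyProduct ls → t.length = ls.length := by
  intro ls
  induction ls with
  | nil => intro t ht; simp [pyProduct] at ht; simp [ht]
  | cons l ls ih =>
    intro t ht
    simp only [pyProduct, List.mem_flatMap, List.mem_map] at ht
    obtain ⟨m, _, t', ht', rfl⟩ := ht
    simp [ih t' ht']

theorem join_singleton_str (y : String) : PySem.Str.join "+" [y] = y := by
  apply String.ext
  simp [PySem.Str.toList_join, PySem.Chars.join_singleton]

theorem join_cons_of_ne_nil (m : String) (t : List String) (ht : t ≠ []) :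
    PySem.Str.join "+" (m :: t) = catPlus m (PySem.Str.join "+" t) := by
  rcases t with _ | ⟨b, t'⟩
  · exact absurd rfl ht
  · apply String.ext
    simp [PySem.Str.toList_join, PySem.Chars.join_cons_cons, catPlus]

theorem pyProduct_singleton (l : List String) : pyProduct [l] = l.map (fun y => [y]) := by
  induction l with
  | nil => rfl
  | cons y l ih => simp [pyProduct] at ih ⊢; simpa using ih

theorem mem_pyProduct_cons (l : List String) (ls : List (List String)) (t : List String) :
    t ∈ pyProduct (l :: ls) ↔ ∃ m ∈ l, ∃ t' ∈ pyProduct ls, t = m :: t' := by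
  simp only [pyProduct, List.mem_flatMap, List.mem_map]
  constructor
  · rintro ⟨m, hm, t', ht', h⟩; exact ⟨m, hm, t', ht', h.symm⟩
  · rintro ⟨m, hm, t', ht', h⟩; exact ⟨m, hm, t', ht', h.symm⟩

theorem mem_combos (params : List (String × String)) :
    ∀ comps, comps ≠ [] → ∀ x, (x ∈ altCombos params comps ↔
      ∃ t ∈ pyProduct (comps.map (findparamsCm (PySem.Dict.ofList params))), x = PySem.Str.join "+" t) := by
  intro comps
  induction comps with
  | nil => intro h; exact absurd rfl h
  | cons c rest ih =>
    intro _ x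
    rcases hr : rest with _ | ⟨c2, rest2⟩
    · rw [altCombos, matchset_eq, PySem.Set.mem_ofList, List.map_cons, List.map_nil,
        pyProduct_singleton]
      constructor
      · intro hx
        exact ⟨[x], List.mem_map.mpr ⟨x, hx, rfl⟩, (join_singleton_str x).symm⟩
      · rintro ⟨t, ht, rfl⟩
        obtain ⟨y, hy, rfl⟩ := List.mem_map.mp ht
        rwa [join_singleton_str]
    · subst hr
      rw [altCombos, PySem.Set.mem_ofList]
      simp only [List.mem_flatMap, List.mem_map]
      constructor
      · rintro ⟨m, hm, s, hs, rfl⟩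
        rw [matchset_eq, PySem.Set.mem_ofList] at hm
        obtain ⟨t', ht', rfl⟩ := (ih (by simp) s).mp hs
        have hne : t' ≠ [] := by
          intro hnil
          have := length_mem_pyProduct _ _ ht'
          rw [hnil] at this
          simp at this
        refine ⟨m :: t', ?_, (join_cons_of_ne_nil m t' hne).symm⟩
        rw [List.map_cons, mem_pyProduct_cons]
        exact ⟨m, hm, t', ht', rfl⟩
      · rintro ⟨t, ht, rfl⟩
        rw [List.map_cons, mem_pyProduct_cons] at ht
        obtain ⟨m, hm, t', ht', rfl⟩ := ht
        have hne : t' ≠ [] := by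
          intro hnil
          have := length_mem_pyProduct _ _ ht'
          rw [hnil] at this
          simp at this
        refine ⟨m, ?_, PySem.Str.join "+" t', (ih (by simp) _).mpr ⟨t', ht', rfl⟩,
          (join_cons_of_ne_nil m t' hne).symm⟩
        rw [matchset_eq, PySem.Set.mem_ofList]
        exact hm

-- ===== VERDICT (by name: the statement is the Claim_ definition above) =====
theorem findparams_spec : Claim_equal_findparams := by
  intro params type _
  unfold Spec_findparams findparams findparams_alt
  dsimp only
  rw [PySem.List.foldl_append_singleton_eq_map]
  simp only [List.nil_append]
  set comps := (PySem.Str.split? type "+").getD [] with hcomps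
  have hne : comps ≠ [] := split_ne_nil type "+" (by decide)
  apply PySem.List.sorted_eq_sorted_of_perm _ _ _ (fun a b h => h)
  rw [List.perm_ext_iff_of_nodup (PySem.Set.nodup_ofList _) (nodup_combos params comps)]
  intro x
  rw [PySem.Set.mem_ofList, List.mem_map, mem_combos params comps hne x]
  constructor
  · rintro ⟨t, ht, rfl⟩; exact ⟨t, ht, rfl⟩
  · rintro ⟨t, ht, rfl⟩; exact ⟨t, ht, rfl⟩
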